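-- pv_equiv track=rewrite | github.com/Awannaphasch2016/dr-daily-report | src/data/aurora/ticker_resolver.py | _extract_exchange_info
-- ===== SOURCE A (Python) =====
-- def _extract_exchange_info(yahoo_symbol: str) -> tuple:
--     """Extract exchange and currency from Yahoo symbol suffix."""
--     exchange_map = {
--         '.SI': ('SGX', 'SGD'),
--         '.T': ('TSE', 'JPY'),
--         '.HK': ('HKEX', 'HKD'),
--         '.VN': ('HOSE', 'VND'),
--         '.TW': ('TWSE', 'TWD'),
--     }
--
--     for suffix, (exchange, currency) in exchange_map.items():
--         if yahoo_symbol.upper().endswith(suffix):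
--             return exchange, currency
--
--     # Default to US market
--     return 'NASDAQ', 'USD'
-- ===== SOURCE B (Python) =====
-- def _extract_exchange_info(yahoo_symbol: str) -> tuple:
--     """Extract exchange and currency from Yahoo symbol suffix."""
--     exchange_map = {
--         '.SI': ('SGX', 'SGD'),
--         '.T': ('TSE', 'JPY'),
--         '.HK': ('HKEX', 'HKD'),
--         '.VN': ('HOSE', 'VND'),
--         '.TW': ('TWSE', 'TWD'),
--     }
--     _root, dot, tail = yahoo_symbol.upper().rpartition('.')
--     if not dot:
--         # No dot anywhere: default to US market
--         return 'NASDAQ', 'USD'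
--     return exchange_map.get('.' + tail, ('NASDAQ', 'USD'))
-- ===== Notes on version B (the rewrite author's own statement) =====
-- stated objective: idiomatic
-- what changed: Replaced A's loop over the five-entry map with an endswith test per entry by a single rpartition('.') that extracts the suffix after the last dot, followed by one dict lookup with the US default.
import Mathlib
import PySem

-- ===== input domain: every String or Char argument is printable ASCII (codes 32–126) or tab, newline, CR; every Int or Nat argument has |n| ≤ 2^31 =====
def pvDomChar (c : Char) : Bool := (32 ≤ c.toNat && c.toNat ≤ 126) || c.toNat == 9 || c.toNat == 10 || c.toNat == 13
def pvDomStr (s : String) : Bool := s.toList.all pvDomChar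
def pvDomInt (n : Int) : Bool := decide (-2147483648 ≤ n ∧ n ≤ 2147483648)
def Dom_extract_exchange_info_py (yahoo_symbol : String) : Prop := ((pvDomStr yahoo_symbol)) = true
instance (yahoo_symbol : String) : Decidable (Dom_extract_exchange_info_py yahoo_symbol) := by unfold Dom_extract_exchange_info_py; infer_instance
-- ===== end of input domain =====

-- B replaces A's endswith-scan over the map by one rpartition('.') + a single dict lookup (idiomatic; return value only).


-- ===== PORT A =====
-- A's exchange_map, iterated in insertion order
def aExchangeMap : List (String × String × String) :=
  [(".SI", ("SGX", "SGD")), (".T", ("TSE", "JPY")), (".HK", ("HKEX", "HKD")),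
   (".VN", ("HOSE", "VND")), (".TW", ("TWSE", "TWD"))]

-- the 'for suffix, (exchange, currency) in exchange_map.items()' loop
def aLoop (yahoo_symbol : String) : List (String × String × String) → String × String
  | [] => ("NASDAQ", "USD")
  | (suffix, exchange, currency) :: rest =>
      if PySem.Str.endswith (PySem.Str.upper yahoo_symbol) suffix then (exchange, currency)
      else aLoop yahoo_symbol rest

def extract_exchange_info_py (yahoo_symbol : String) : String × String :=
  aLoop yahoo_symbol aExchangeMap

-- ===== PORT B =====
def bExchangeMap : PySem.Dict String (String × String) :=
  PySem.Dict.ofList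
    [(".SI", ("SGX", "SGD")), (".T", ("TSE", "JPY")), (".HK", ("HKEX", "HKD")),
     (".VN", ("HOSE", "VND")), (".TW", ("TWSE", "TWD"))]

-- str.rpartition('.') has no PySem primitive; exact hand port for the one-char separator:
-- some (root, tail) splits at the LAST '.' (input = root ++ '.' :: tail), none when no '.' occurs
-- (Python then returns ('', '', s); only the emptiness of the separator part is used below).
def rpartitionDot : List Char → Option (List Char × List Char)
  | [] => none
  | c :: rest =>
      match rpartitionDot rest with
      | some (r, t) => some (c :: r, t)
      | none => if c = '.' then some ([], rest) else none

def extract_exchange_info_py_alt (yahoo_symbol : String) : String × String :=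
  match rpartitionDot (PySem.Str.upper yahoo_symbol).toList with
  | none => ("NASDAQ", "USD")
  | some (_, tail) =>
      (PySem.Dict.get? bExchangeMap (String.ofList ('.' :: tail))).getD ("NASDAQ", "USD")

-- ===== PRECONDITION & SPEC =====
def Spec_extract_exchange_info_py (yahoo_symbol : String) (out : String × String) : Prop := out = extract_exchange_info_py_alt yahoo_symbol
instance (yahoo_symbol : String) (out : String × String) : Decidable (Spec_extract_exchange_info_py yahoo_symbol out) := by unfold Spec_extract_exchange_info_py; infer_instance

-- ===== CLAIM (what is proved, stated in full; the proofs are below) =====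
def Claim_equal_extract_exchange_info_py : Prop := ∀ (yahoo_symbol : String), Dom_extract_exchange_info_py yahoo_symbol → Spec_extract_exchange_info_py yahoo_symbol (extract_exchange_info_py yahoo_symbol)

-- ===== LEMMAS AND PROOFS =====

-- rpartitionDot finds no split exactly when there is no '.'
theorem rpartitionDot_eq_none_iff (cs : List Char) : rpartitionDot cs = none ↔ '.' ∉ cs := by
  induction cs with
  | nil => simp [rpartitionDot]
  | cons c rest ih =>
      simp only [rpartitionDot, List.mem_cons]
      cases h : rpartitionDot rest with
      | some p =>
          have hm : '.' ∈ rest := by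
            by_contra hm; rw [ih.mpr hm] at h; simp at h
          simp [hm]
      | none =>
          by_cases hc : c = '.'
          · subst hc; simp
          · simp [Ne.symm hc, hc, ih.mp h]

-- a successful split is at the LAST '.'
theorem rpartitionDot_eq_some (cs : List Char) (r t : List Char)
    (h : rpartitionDot cs = some (r, t)) : cs = r ++ '.' :: t ∧ '.' ∉ t := by
  induction cs generalizing r t with
  | nil => simp [rpartitionDot] at h
  | cons c rest ih =>
      simp only [rpartitionDot] at h
      cases h' : rpartitionDot rest with
      | some p =>
          obtain ⟨r', t'⟩ := p
          rw [h'] at h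
          simp only [Option.some.injEq, Prod.mk.injEq] at h
          obtain ⟨hr, ht⟩ := h
          obtain ⟨h1, h2⟩ := ih r' t' h'
          subst hr ht
          rw [h1]
          exact ⟨by simp, h2⟩
      | none =>
          rw [h'] at h
          by_cases hc : c = '.'
          · simp only [if_pos hc, Option.some.injEq, Prod.mk.injEq] at h
            obtain ⟨hr, ht⟩ := h
            subst hr ht
            exact ⟨by simp [hc], (rpartitionDot_eq_none_iff rest).mp h'⟩
          · simp [hc] at h

-- among suffixes of one list the shorter is a suffix of the longer
theorem suffix_of_suffix_of_length_le {l p q : List Char} (hp : p <:+ l) (hq : q <:+ l)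
    (h : p.length ≤ q.length) : p <:+ q := by
  rcases List.suffix_or_suffix_of_suffix hp hq with h1 | h1
  · exact h1
  · rw [List.IsSuffix.eq_of_length_le h1 h]

-- a pattern '.'∘p' (no further dot) is a suffix of r ++ '.'∘t (no dot in t) exactly when p' = t
theorem ends_iff (r t p' : List Char) (hndt : '.' ∉ t) (hndp : '.' ∉ p') :
    ('.' :: p') <:+ (r ++ '.' :: t) ↔ t = p' := by
  constructor
  · intro h
    have hsuf : ('.' :: t) <:+ (r ++ '.' :: t) := ⟨r, rfl⟩
    rcases Nat.le_total (p'.length + 1) (t.length + 1) with hl | hl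
    · have h2 := suffix_of_suffix_of_length_le h hsuf (by simpa using hl)
      rcases List.suffix_cons_iff.mp h2 with h1 | h1
      · simpa [eq_comm] using h1
      · exact absurd (h1.subset (by simp)) hndt
    · have h2 := suffix_of_suffix_of_length_le hsuf h (by simpa using hl)
      rcases List.suffix_cons_iff.mp h2 with h1 | h1
      · simpa using h1
      · exact absurd (h1.subset (by simp)) hndp
  · rintro rfl; exact ⟨r, rfl⟩

-- the dict lookup misses when the tail is none of the five known suffixes
theorem lookup_default (t : List Char) (h1 : t ≠ ['S','I']) (h2 : t ≠ ['T'])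
    (h3 : t ≠ ['H','K']) (h4 : t ≠ ['V','N']) (h5 : t ≠ ['T','W']) :
    PySem.Dict.get? bExchangeMap (String.ofList ('.' :: t)) = none := by
  have hb : bExchangeMap = PySem.Dict.mk
      [(".SI", ("SGX", "SGD")), (".T", ("TSE", "JPY")), (".HK", ("HKEX", "HKD")),
       (".VN", ("HOSE", "VND")), (".TW", ("TWSE", "TWD"))] := by decide
  have key : ∀ (k : String) (l : List Char), k.toList ≠ '.' :: l →
      (k == String.ofList ('.' :: l)) = false := by
    intro k l hk
    simp only [beq_eq_false_iff_ne, ne_eq]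
    intro he
    exact hk (by simpa using (congrArg String.toList he))
  rw [hb, PySem.Dict.get?_mk_cons, PySem.Dict.get?_mk_cons, PySem.Dict.get?_mk_cons,
      PySem.Dict.get?_mk_cons, PySem.Dict.get?_mk_cons,
      key _ t (by simpa using fun h => h1 h.symm), key _ t (by simpa using fun h => h2 h.symm),
      key _ t (by simpa using fun h => h3 h.symm), key _ t (by simpa using fun h => h4 h.symm),
      key _ t (by simpa using fun h => h5 h.symm)]
  simp [PySem.Dict.get?]

theorem extract_exchange_info_py_spec : Claim_equal_extract_exchange_info_py := by
  intro s _
  unfold Spec_extract_exchange_info_py extract_exchange_info_py extract_exchange_info_py_alt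
  simp only [aExchangeMap, aLoop, PySem.Str.endswith_eq, PySem.Chars.endswith]
  cases h : rpartitionDot (PySem.Str.upper s).toList with
  | none =>
      have hnd : '.' ∉ (PySem.Str.upper s).toList := (rpartitionDot_eq_none_iff _).mp h
      have hfail : ∀ p : List Char, '.' ∈ p → p.isSuffixOf (PySem.Str.upper s).toList = false := by
        intro p hp
        rw [Bool.eq_false_iff]
        intro hs
        exact hnd (List.IsSuffix.subset (List.isSuffixOf_iff_suffix.mp hs) hp)
      rw [hfail _ (by decide), hfail _ (by decide), hfail _ (by decide),
          hfail _ (by decide), hfail _ (by decide)]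
      simp
  | some p =>
      obtain ⟨r, t⟩ := p
      obtain ⟨heq, hnd⟩ := rpartitionDot_eq_some _ r t h
      rw [heq]
      simp only [show String.toList ".SI" = '.' :: ['S','I'] from rfl,
                 show String.toList ".T" = '.' :: ['T'] from rfl,
                 show String.toList ".HK" = '.' :: ['H','K'] from rfl,
                 show String.toList ".VN" = '.' :: ['V','N'] from rfl,
                 show String.toList ".TW" = '.' :: ['T','W'] from rfl,
                 List.isSuffixOf_iff_suffix,
                 ends_iff r t ['S','I'] hnd (by decide), ends_iff r t ['T'] hnd (by decide),
                 ends_iff r t ['H','K'] hnd (by decide), ends_iff r t ['V','N'] hnd (by decide),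
                 ends_iff r t ['T','W'] hnd (by decide)]
      split_ifs with h1 h2 h3 h4 h5
      · subst h1; decide
      · subst h2; decide
      · subst h3; decide
      · subst h4; decide
      · subst h5; decide
      · rw [lookup_default t h1 h2 h3 h4 h5]
        rfl

-- ===== VERDICT (by name: the statement is the Claim_ definition above) =====
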